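-- pv_equiv track=rewrite | github.com/maitdevptyltd/praeparo | praeparo/pack/revisions.py | _normalise_revision_token
-- ===== SOURCE A (Python) =====
-- def _normalise_revision_token(raw: str) -> str:
--     """Make a filesystem-friendly revision token while keeping human cues."""
--
--     cleaned = []
--     previous_sep = False
--     for char in raw.strip():
--         if char.isalnum():
--             cleaned.append(char.lower())
--             previous_sep = False
--             continue
--         if char in "-_":
--             if not previous_sep:
--                 cleaned.append(char)
--                 previous_sep = True
--             continue
--         if not previous_sep:
--             cleaned.append("_")
--             previous_sep = True
--     token = "".join(cleaned).strip("-_")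
--     return token or "rev"
-- ===== SOURCE B (Python) =====
-- def _normalise_revision_token(raw: str) -> str:
--     """Run-based rewrite: scan maximal alnum/non-alnum runs instead of a per-char flag."""
--     s = raw.strip()
--     parts = []
--     i = 0
--     n = len(s)
--     while i < n:
--         k = s[i].isalnum()
--         j = i + 1
--         while j < n and s[j].isalnum() == k:
--             j += 1
--         if k:
--             parts.append(s[i:j].lower())
--         else:
--             parts.append(s[i] if s[i] in "-_" else "_")
--         i = j
--     token = "".join(parts).strip("-_")
--     return token or "rev"
-- ===== Notes on version B (the rewrite author's own statement) =====
-- stated objective: alternative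
-- what changed: Replaced the per-character previous_sep flag machine by a run scanner over maximal alnum/non-alnum runs: an alnum run is lowered wholesale, a non-alnum run contributes one separator chosen from its first character.
import Mathlib
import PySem

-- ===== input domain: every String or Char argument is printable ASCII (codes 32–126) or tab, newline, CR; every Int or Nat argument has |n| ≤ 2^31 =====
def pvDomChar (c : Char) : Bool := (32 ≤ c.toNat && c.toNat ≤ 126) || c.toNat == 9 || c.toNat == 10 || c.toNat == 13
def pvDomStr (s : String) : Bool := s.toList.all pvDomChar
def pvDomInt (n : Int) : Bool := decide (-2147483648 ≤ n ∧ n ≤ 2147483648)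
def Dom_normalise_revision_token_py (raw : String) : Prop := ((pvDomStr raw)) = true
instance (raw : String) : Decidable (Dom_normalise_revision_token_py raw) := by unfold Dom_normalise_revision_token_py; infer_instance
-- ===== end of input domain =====

-- B replaces A's per-character previous_sep flag by a scan over maximal alnum/non-alnum runs (alternative decomposition, same cost).

-- ===== PORT A =====
-- state = (cleaned, previous_sep); one step of A's for-loop body
def pvStepA (st : List Char × Bool) (c : Char) : List Char × Bool :=
  if PySem.Chars.isalnum c then (st.1 ++ [PySem.Chars.lowerChar c], false)
  else if c = '-' ∨ c = '_' then (if st.2 then st else (st.1 ++ [c], true))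
  else if st.2 then st else (st.1 ++ ['_'], true)

def normalise_revision_token_py (raw : String) : String :=
  let cleaned := ((PySem.Chars.strip raw.toList).foldl pvStepA ([], false)).1
  let token := PySem.Chars.stripChars cleaned ['-', '_']
  if token = [] then "rev" else String.ofList token

-- ===== PORT B =====
-- runs of equal str.isalnum key (the inner while of Source B = takeWhile/dropWhile on the tail)
def pvRunsB : List Char → List Char
  | [] => []
  | c :: rest =>
    let k := PySem.Chars.isalnum c
    let run := rest.takeWhile (fun x => PySem.Chars.isalnum x == k)
    let rest' := rest.dropWhile (fun x => PySem.Chars.isalnum x == k)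
    (if k then (c :: run).map PySem.Chars.lowerChar
     else if c = '-' ∨ c = '_' then [c] else ['_']) ++ pvRunsB rest'
termination_by cs => cs.length
decreasing_by
  exact Nat.lt_succ_of_le (List.length_dropWhile_le _ _)

def normalise_revision_token_py_alt (raw : String) : String :=
  let token := PySem.Chars.stripChars (pvRunsB (PySem.Chars.strip raw.toList)) ['-', '_']
  if token = [] then "rev" else String.ofList token

-- ===== PRECONDITION & SPEC =====
def Spec_normalise_revision_token_py (raw : String) (out : String) : Prop := out = normalise_revision_token_py_alt raw
instance (raw : String) (out : String) : Decidable (Spec_normalise_revision_token_py raw out) := by unfold Spec_normalise_revision_token_py; infer_instance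

-- ===== CLAIM (what is proved, stated in full; the proofs are below) =====
def Claim_equal_normalise_revision_token_py : Prop := ∀ (raw : String), Dom_normalise_revision_token_py raw → Spec_normalise_revision_token_py raw (normalise_revision_token_py raw)

-- ===== LEMMAS AND PROOFS =====

lemma pvStepA_alnum (st : List Char × Bool) (c : Char) (h : PySem.Chars.isalnum c = true) :
    pvStepA st c = (st.1 ++ [PySem.Chars.lowerChar c], false) := by
  simp [pvStepA, h]

lemma pvStepA_nonalnum_true (a : List Char) (c : Char) (h : PySem.Chars.isalnum c = false) :
    pvStepA (a, true) c = (a, true) := by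
  by_cases hc : c = '-' ∨ c = '_' <;> simp [pvStepA, h, hc]

lemma pvStepA_true_eq_false_of_alnum (a : List Char) (d : Char)
    (h : PySem.Chars.isalnum d = true) :
    pvStepA (a, true) d = pvStepA (a, false) d := by
  simp [pvStepA, h]

lemma pvRunsB_cons (c : Char) (rest : List Char) :
    pvRunsB (c :: rest)
      = (if PySem.Chars.isalnum c then
           (c :: rest.takeWhile (fun x => PySem.Chars.isalnum x == PySem.Chars.isalnum c)).map PySem.Chars.lowerChar
         else if c = '-' ∨ c = '_' then [c] else ['_'])
        ++ pvRunsB (rest.dropWhile (fun x => PySem.Chars.isalnum x == PySem.Chars.isalnum c)) := by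
  rw [pvRunsB]

-- an alnum run from sep=false: append its lowering, stay at sep=false
lemma pvFold_alnum_run (run : List Char) (t : List Char) (acc : List Char)
    (h : ∀ x ∈ run, PySem.Chars.isalnum x = true) :
    (run ++ t).foldl pvStepA (acc, false)
      = t.foldl pvStepA (acc ++ run.map PySem.Chars.lowerChar, false) := by
  induction run generalizing acc with
  | nil => simp
  | cons c rs ih =>
    have hc := h c (by simp)
    simp only [List.cons_append, List.foldl_cons, pvStepA_alnum _ _ hc]
    rw [ih _ (fun x hx => h x (by simp [hx]))]
    simp

-- a non-alnum run at sep=true contributes nothing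
lemma pvFold_nonalnum_run (rs : List Char) (t : List Char) (acc : List Char)
    (h : ∀ x ∈ rs, PySem.Chars.isalnum x = false) :
    (rs ++ t).foldl pvStepA (acc, true) = t.foldl pvStepA (acc, true) := by
  induction rs with
  | nil => simp
  | cons c rest ih =>
    have hc := h c (by simp)
    simp only [List.cons_append, List.foldl_cons, pvStepA_nonalnum_true _ _ hc]
    exact ih (fun x hx => h x (by simp [hx]))

lemma pvMain : ∀ (n : Nat) (cs : List Char), cs.length ≤ n → ∀ acc : List Char,
    (cs.foldl pvStepA (acc, false)).1 = acc ++ pvRunsB cs := by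
  intro n
  induction n with
  | zero =>
    intro cs h acc
    have : cs = [] := List.eq_nil_of_length_eq_zero (Nat.le_zero.mp h)
    subst this; simp [pvRunsB]
  | succ n ih =>
    intro cs h acc
    cases cs with
    | nil => simp [pvRunsB]
    | cons c rest =>
      have hsplit : rest = rest.takeWhile (fun x => PySem.Chars.isalnum x == PySem.Chars.isalnum c)
          ++ rest.dropWhile (fun x => PySem.Chars.isalnum x == PySem.Chars.isalnum c) :=
        (List.takeWhile_append_dropWhile).symm
      have hlen : (rest.dropWhile (fun x => PySem.Chars.isalnum x == PySem.Chars.isalnum c)).length ≤ n := by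
        have := List.length_dropWhile_le (fun x => PySem.Chars.isalnum x == PySem.Chars.isalnum c) rest
        simp only [List.length_cons] at h
        omega
      by_cases hk : PySem.Chars.isalnum c = true
      · -- alnum run
        have hruntrue : ∀ x ∈ c :: rest.takeWhile (fun x => PySem.Chars.isalnum x == PySem.Chars.isalnum c),
            PySem.Chars.isalnum x = true := by
          intro x hx
          rcases List.mem_cons.mp hx with hx | hx
          · subst hx; exact hk
          · have := List.mem_takeWhile_imp hx
            simpa [hk] using this
        conv_lhs => rw [show (c :: rest)
            = (c :: rest.takeWhile (fun x => PySem.Chars.isalnum x == PySem.Chars.isalnum c))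
              ++ rest.dropWhile (fun x => PySem.Chars.isalnum x == PySem.Chars.isalnum c) by
          rw [List.cons_append, ← hsplit]]
        rw [pvFold_alnum_run _ _ _ hruntrue, ih _ hlen, pvRunsB_cons, if_pos hk]
        simp
      · -- non-alnum run
        have hk' : PySem.Chars.isalnum c = false := by simpa using hk
        have hrunfalse : ∀ x ∈ rest.takeWhile (fun x => PySem.Chars.isalnum x == PySem.Chars.isalnum c),
            PySem.Chars.isalnum x = false := by
          intro x hx
          have := List.mem_takeWhile_imp hx
          simpa [hk'] using this
        have hstep1 : pvStepA (acc, false) c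
            = (acc ++ (if c = '-' ∨ c = '_' then [c] else ['_']), true) := by
          by_cases hc : c = '-' ∨ c = '_' <;> simp [pvStepA, hk', hc]
        simp only [List.foldl_cons, hstep1]
        conv_lhs => rw [hsplit]
        rw [pvFold_nonalnum_run _ _ _ hrunfalse, pvRunsB_cons, if_neg hk]
        cases hrest' : rest.dropWhile (fun x => PySem.Chars.isalnum x == PySem.Chars.isalnum c) with
        | nil => simp [pvRunsB]
        | cons d t =>
          have hd : PySem.Chars.isalnum d = true := by
            have hh := List.head?_dropWhile_not (fun x => PySem.Chars.isalnum x == PySem.Chars.isalnum c) rest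
            rw [hrest'] at hh
            simp only [List.head?_cons] at hh
            simpa [hk'] using hh
          rw [List.foldl_cons, pvStepA_true_eq_false_of_alnum _ _ hd, ← List.foldl_cons]
          rw [ih (d :: t) (by rw [hrest'] at hlen; exact hlen) (acc ++ (if c = '-' ∨ c = '_' then [c] else ['_']))]
          simp

-- ===== VERDICT (by name: the statement is the Claim_ definition above) =====
theorem normalise_revision_token_py_spec : Claim_equal_normalise_revision_token_py := by
  intro raw _
  unfold Spec_normalise_revision_token_py normalise_revision_token_py normalise_revision_token_py_alt
  rw [pvMain (PySem.Chars.strip raw.toList).length _ le_rfl []]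
  simp
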